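-- pv_equiv track=rewrite | github.com/dmp2/wsi-tissue-pipeline | src/wsi_pipeline/omezarr/metadata.py | _voxel_sizes_for_mips_xy
-- ===== SOURCE A (Python) =====
-- def _voxel_sizes_for_mips_xy(phys_xyz: int, levels: int, scale_factor: int = 2) -> list[tuple[int,int,int]]:
--     """
--     phys_xyz is (x_nm, y_nm, z_nm).
--     Double XY per MIP; keep Z fixed.
--     Returns [(x0,y0,z0), (x1,y1,z1), ...] as ints.
--     """
--     voxel_sizes = []
--     x, y, z = phys_xyz
--     x = int(round(x))
--     y = int(round(y))
--     z = int(round(z))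
--     for _ in range(levels):
--         voxel_sizes.append((x, y, z))
--         x *= scale_factor
--         y *= scale_factor
--         # Keep z the same since these are 2D plates
--     return voxel_sizes
-- ===== SOURCE B (Python) =====
-- def _voxel_sizes_for_mips_xy(phys_xyz: int, levels: int, scale_factor: int = 2) -> list[tuple[int,int,int]]:
--     """Closed form: level i's XY sizes are the base sizes times scale_factor**i; Z fixed."""
--     x, y, z = phys_xyz
--     x, y, z = int(round(x)), int(round(y)), int(round(z))
--     return [(x * scale_factor**i, y * scale_factor**i, z) for i in range(levels)]
-- ===== Notes on version B (the rewrite author's own statement) =====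
-- stated objective: simpler
-- what changed: Replaces the running x/y accumulator loop with a single comprehension computing each level in closed form as base * scale_factor**i.
import Mathlib
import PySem

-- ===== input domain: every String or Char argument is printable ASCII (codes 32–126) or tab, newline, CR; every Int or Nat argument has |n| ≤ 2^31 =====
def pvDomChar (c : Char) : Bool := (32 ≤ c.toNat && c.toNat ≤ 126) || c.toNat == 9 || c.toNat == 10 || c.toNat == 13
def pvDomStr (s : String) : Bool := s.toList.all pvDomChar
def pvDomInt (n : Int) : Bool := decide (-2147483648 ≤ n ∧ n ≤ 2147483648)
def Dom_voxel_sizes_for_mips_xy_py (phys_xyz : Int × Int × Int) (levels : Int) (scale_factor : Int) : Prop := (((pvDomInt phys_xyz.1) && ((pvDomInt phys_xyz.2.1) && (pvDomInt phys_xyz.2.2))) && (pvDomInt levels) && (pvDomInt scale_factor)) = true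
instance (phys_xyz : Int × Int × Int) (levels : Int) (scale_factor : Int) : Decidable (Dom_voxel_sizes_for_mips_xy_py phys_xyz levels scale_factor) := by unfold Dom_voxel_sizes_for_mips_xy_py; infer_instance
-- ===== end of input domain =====

-- B computes each level's voxel size in closed form (base * scale_factor^i) instead of A's running accumulator; objective: simpler.


-- ===== PORT A =====
-- the loop body: append (x, y, z), then x *= s; y *= s (z stays).
-- int(round(·)) on a Python int is the identity, so the ports take x, y, z directly.
def vsStepA (z s : Int) (st : List (Int × Int × Int) × Int × Int) (_i : Int) :
    List (Int × Int × Int) × Int × Int :=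
  (st.1 ++ [(st.2.1, st.2.2, z)], st.2.1 * s, st.2.2 * s)

def voxel_sizes_for_mips_xy_py (phys_xyz : Int × Int × Int) (levels : Int) (scale_factor : Int) : List (Int × Int × Int) :=
  let x := phys_xyz.1
  let y := phys_xyz.2.1
  let z := phys_xyz.2.2
  ((PySem.List.pyRange 0 levels 1).foldl (vsStepA z scale_factor) ([], x, y)).1

-- ===== PORT B =====
def voxel_sizes_for_mips_xy_py_alt (phys_xyz : Int × Int × Int) (levels : Int) (scale_factor : Int) : List (Int × Int × Int) :=
  let x := phys_xyz.1
  let y := phys_xyz.2.1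
  let z := phys_xyz.2.2
  -- i ranges over 0..levels-1, so i.toNat is exact for scale_factor**i
  (PySem.List.pyRange 0 levels 1).map (fun i => (x * scale_factor ^ i.toNat, y * scale_factor ^ i.toNat, z))

-- ===== PRECONDITION & SPEC =====
def Spec_voxel_sizes_for_mips_xy_py (phys_xyz : Int × Int × Int) (levels : Int) (scale_factor : Int) (out : List (Int × Int × Int)) : Prop := out = voxel_sizes_for_mips_xy_py_alt phys_xyz levels scale_factor
instance (phys_xyz : Int × Int × Int) (levels : Int) (scale_factor : Int) (out : List (Int × Int × Int)) : Decidable (Spec_voxel_sizes_for_mips_xy_py phys_xyz levels scale_factor out) := by unfold Spec_voxel_sizes_for_mips_xy_py; infer_instance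

-- ===== CLAIM (what is proved, stated in full; the proofs are below) =====
def Claim_equal_voxel_sizes_for_mips_xy_py : Prop := ∀ (phys_xyz : Int × Int × Int) (levels : Int) (scale_factor : Int), Dom_voxel_sizes_for_mips_xy_py phys_xyz levels scale_factor → Spec_voxel_sizes_for_mips_xy_py phys_xyz levels scale_factor (voxel_sizes_for_mips_xy_py phys_xyz levels scale_factor)

-- ===== LEMMAS AND PROOFS =====
theorem vs_fold_eq (z s : Int) (l : List Int) (acc : List (Int × Int × Int)) (x y : Int) :
    (l.foldl (vsStepA z s) (acc, x, y)).1
      = acc ++ (List.range l.length).map (fun k => (x * s ^ k, y * s ^ k, z)) := by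
  induction l generalizing acc x y with
  | nil => simp
  | cons h t ih =>
    simp only [List.foldl_cons, vsStepA, List.length_cons]
    rw [ih]
    rw [List.range_succ_eq_map]
    simp only [List.map_cons, List.map_map]
    simp only [List.append_assoc, List.singleton_append]
    congr 2
    · simp [pow_zero, mul_one]
    · apply List.map_congr_left
      intro k _
      simp only [Function.comp_apply, pow_succ]
      exact Prod.ext (by ring) (Prod.ext (by ring) rfl)

theorem vs_map_range (x y z s : Int) (levels : Int) :
    voxel_sizes_for_mips_xy_py_alt (x, y, z) levels s
      = (List.range (PySem.List.pyRange 0 levels 1).length).map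
          (fun k => (x * s ^ k, y * s ^ k, z)) := by
  simp only [voxel_sizes_for_mips_xy_py_alt]
  rw [PySem.List.pyRange_one]
  simp only [List.map_map, List.length_map, List.length_range]
  apply List.map_congr_left
  intro k _
  simp

-- ===== VERDICT (by name: the statement is the Claim_ definition above) =====
theorem voxel_sizes_for_mips_xy_py_spec : Claim_equal_voxel_sizes_for_mips_xy_py := by
  intro ⟨x, y, z⟩ levels s _
  show voxel_sizes_for_mips_xy_py (x, y, z) levels s = voxel_sizes_for_mips_xy_py_alt (x, y, z) levels s
  rw [vs_map_range]
  simpa using vs_fold_eq z s (PySem.List.pyRange 0 levels 1) [] x y
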